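-- pv_equiv track=rewrite | github.com/lclar/CptS355 | Hw1.py | dictAddup
-- ===== SOURCE A (Python) =====
-- from collections import defaultdict, OrderedDict
--
-- def dictAddup(d):
--     hours = defaultdict(int)
--     #merge and add up the hours for each day and each class
--     for k, v, in d.items():
--         tempSum = 0;
--         for k2, v2 in v.items():
--             hours[k2] += v2
--     #sort the dictionary to make testing easier
--     hours2 = OrderedDict(sorted(hours.items()))
--     return dict(hours2)
--     pass
-- ===== SOURCE B (Python) =====
-- def dictAddup(d):
--     keys = sorted({k2 for v in d.values() for k2 in v})
--     return {k2: sum(h for v in d.values() for day, h in v.items() if day == k2)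
--             for k2 in keys}
-- ===== Notes on version B (the rewrite author's own statement) =====
-- stated objective: idiomatic
-- what changed: B first collects the sorted union of all inner keys, then computes each key's total by a scan of the inner dicts in a dict comprehension, instead of A's mutable defaultdict accumulator that is sorted and repacked afterwards.
import Mathlib
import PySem

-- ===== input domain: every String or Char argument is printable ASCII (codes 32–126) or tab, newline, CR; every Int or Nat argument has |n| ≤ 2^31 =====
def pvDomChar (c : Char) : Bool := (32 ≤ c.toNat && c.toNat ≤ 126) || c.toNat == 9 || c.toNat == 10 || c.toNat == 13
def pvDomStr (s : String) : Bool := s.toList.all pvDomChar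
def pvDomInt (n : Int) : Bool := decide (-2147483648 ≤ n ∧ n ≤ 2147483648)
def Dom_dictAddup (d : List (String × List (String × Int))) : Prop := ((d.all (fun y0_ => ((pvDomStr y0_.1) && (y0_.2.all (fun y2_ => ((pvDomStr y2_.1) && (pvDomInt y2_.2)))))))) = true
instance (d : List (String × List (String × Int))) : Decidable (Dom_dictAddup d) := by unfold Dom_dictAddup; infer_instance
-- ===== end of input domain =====

-- B replaces A's mutable defaultdict accumulator (sorted and repacked at the end) by a
-- sorted union of the inner keys followed by a per-key scan of the inner dicts (idiomatic, same cost class).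

-- ===== PORT A =====
-- hours = defaultdict(int); for k,v in d.items(): for k2,v2 in v.items(): hours[k2] += v2
-- (the assignment 'tempSum = 0' in A is dead code); then sorted(hours.items()) as a dict.
def dictAddup (d : List (String × List (String × Int))) : List (String × Int) :=
  let hours : PySem.Dict String Int :=
    d.foldl (fun hours kv =>
        kv.2.foldl (fun hours p => hours.modify p.1 0 (· + p.2)) hours)
      PySem.Dict.empty
  let hours2 := PySem.List.sorted2 hours.items (fun t => t.1) (fun t => t.2) false
  hours2

-- ===== PORT B =====
-- keys = sorted({k2 for v in d.values() for k2 in v});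
-- {k2: sum(h for v in d.values() for day, h in v.items() if day == k2) for k2 in keys}
def dictAddup_alt (d : List (String × List (String × Int))) : List (String × Int) :=
  let keys := PySem.List.sorted
      (PySem.Set.ofList (d.flatMap (fun kv => kv.2.map (fun p => p.1)))) (fun k => k) false
  keys.map (fun k2 =>
    (k2, (d.flatMap (fun kv => (kv.2.filter (fun p => p.1 == k2)).map (fun p => p.2))).sum))

-- ===== PRECONDITION & SPEC =====
def Spec_dictAddup (d : List (String × List (String × Int))) (out : List (String × Int)) : Prop := out = dictAddup_alt d
instance (d : List (String × List (String × Int))) (out : List (String × Int)) : Decidable (Spec_dictAddup d out) := by unfold Spec_dictAddup; infer_instance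

-- ===== CLAIM (what is proved, stated in full; the proofs are below) =====
def Claim_equal_dictAddup : Prop := ∀ (d : List (String × List (String × Int))), Dom_dictAddup d → Spec_dictAddup d (dictAddup d)

-- ===== LEMMAS AND PROOFS =====

-- the accumulating dict's lookup: default plus the sum of the matching inner values
theorem getD_foldl_modify_add (L : List (String × Int)) (h0 : PySem.Dict String Int) (k : String) :
    (L.foldl (fun h p => h.modify p.1 0 (· + p.2)) h0).getD k 0
      = h0.getD k 0 + ((L.filter (fun p => p.1 == k)).map (fun p => p.2)).sum := by
  induction L generalizing h0 with
  | nil => simp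
  | cons p L ih =>
    simp only [List.foldl_cons, ih, PySem.Dict.getD_modify, List.filter_cons]
    by_cases h : p.1 = k
    · simp [h, add_comm, add_assoc, add_left_comm]
    · simp [h, Ne.symm h]

-- insertBy commutes with mapping g when the order relations correspond through g
theorem insertBy_map {α β : Type} (bα : α → α → Bool) (bβ : β → β → Bool) (g : α → β)
    (hg : ∀ a b, bβ (g a) (g b) = bα a b) (x : α) (l : List α) :
    PySem.List.insertBy bβ (g x) (l.map g) = (PySem.List.insertBy bα x l).map g := by
  induction l with
  | nil => simp [PySem.List.insertBy]
  | cons y ys ih =>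
    simp only [List.map_cons, PySem.List.insertBy, hg]
    by_cases h : bα x y <;> simp [h, ih]

theorem foldl_insertBy_map {α β : Type} (bα : α → α → Bool) (bβ : β → β → Bool) (g : α → β)
    (hg : ∀ a b, bβ (g a) (g b) = bα a b) (l : List α) (init : List α) :
    (l.map g).foldl (fun acc x => PySem.List.insertBy bβ x acc) (init.map g)
      = (l.foldl (fun acc x => PySem.List.insertBy bα x acc) init).map g := by
  induction l generalizing init with
  | nil => simp
  | cons x xs ih => simpa [insertBy_map bα bβ g hg] using ih (PySem.List.insertBy bα x init)

-- sorting pairs lexicographically is sorting by the (distinct) first components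
theorem sorted2_map_pairs (S : String → Int) (l : List String) :
    PySem.List.sorted2 (l.map (fun k => (k, S k))) (fun t => t.1) (fun t => t.2) false
      = (PySem.List.sorted l (fun k => k) false).map (fun k => (k, S k)) := by
  have hg : ∀ a b : String,
      ((fun x y : String × Int => decide (x.1 < y.1) || (!decide (y.1 < x.1) && decide (x.2 < y.2)))
          ((fun k => (k, S k)) a) ((fun k => (k, S k)) b))
        = (fun a b : String => decide (a < b)) a b := by
    intro a b
    rcases lt_trichotomy a b with h | h | h
    · simp [h]
    · subst h; simp
    · simp [h, not_lt_of_gt h]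
  have hmain := foldl_insertBy_map (fun a b : String => decide (a < b))
      (fun x y : String × Int => decide (x.1 < y.1) || (!decide (y.1 < x.1) && decide (x.2 < y.2)))
      (fun k => (k, S k)) hg l []
  simp only [List.map_nil] at hmain
  rw [PySem.List.sorted_eq_foldl_insertBy]
  exact hmain

-- ===== VERDICT (by name: the statement is the Claim_ definition above) =====
theorem dictAddup_spec : Claim_equal_dictAddup := by
  intro d _
  show dictAddup d = dictAddup_alt d
  simp only [dictAddup, dictAddup_alt]
  -- the nested accumulation loop is a fold over the flattened inner items
  rw [← List.foldl_flatMap]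
  set L := d.flatMap (fun kv => kv.2) with hL
  have hkeys : (L.foldl (fun h p => h.modify p.1 0 (· + p.2)) PySem.Dict.empty).keys
      = PySem.Set.ofList (L.map (fun p => p.1)) := by
    simpa using PySem.Dict.keys_foldl_modify_key L (fun p => p.1) 0
      (fun h p => (· + p.2)) PySem.Dict.empty
  have hnd : (L.foldl (fun h p => h.modify p.1 0 (· + p.2)) PySem.Dict.empty).keys.Nodup := by
    rw [hkeys]; exact PySem.Set.nodup_ofList _
  rw [PySem.Dict.items_eq_map_keys _ hnd 0, hkeys]
  simp only [getD_foldl_modify_add, PySem.Dict.getD_empty, zero_add]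
  rw [sorted2_map_pairs (fun k => ((L.filter (fun p => p.1 == k)).map (fun p => p.2)).sum)]
  congr 1
  · funext k
    rw [hL]
    simp [List.filter_flatMap, List.map_flatMap]
  · rw [hL]
    simp [List.map_flatMap]
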